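-- pv_equiv track=rewrite | github.com/adam-jackson-cf/flutter-aws-poc | aws/lambda/evaluate_stage.py | _aggregate_llm_usage
-- ===== SOURCE A (Python) =====
-- from typing import Any, Dict
--
-- def _int_metric(value: Any) -> int:
--     if isinstance(value, bool):
--         return int(value)
--     if isinstance(value, (int, float)):
--         return int(value)
--     return 0
--
-- def _aggregate_llm_usage(event: Dict[str, Any]) -> Dict[str, int]:
--     source = event.get("llm_usage", {})
--     if not isinstance(source, dict):
--         source = {}
--     totals = {"input_tokens": 0, "output_tokens": 0, "total_tokens": 0}
--     for usage in source.values():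
--         if not isinstance(usage, dict):
--             continue
--         totals["input_tokens"] += _int_metric(usage.get("input_tokens", 0))
--         totals["output_tokens"] += _int_metric(usage.get("output_tokens", 0))
--         totals["total_tokens"] += _int_metric(usage.get("total_tokens", 0))
--     totals["input_tokens"] = max(0, totals["input_tokens"])
--     totals["output_tokens"] = max(0, totals["output_tokens"])
--     totals["total_tokens"] = max(0, totals["total_tokens"])
--     return totals
-- ===== SOURCE B (Python) =====
-- def _int_metric(value):
--     if isinstance(value, bool):
--         return int(value)
--     if isinstance(value, (int, float)):
--         return int(value)
--     return 0
--
--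
-- _KEYS = ("input_tokens", "output_tokens", "total_tokens")
--
--
-- def _entry_triple(usage):
--     if not isinstance(usage, dict):
--         return (0, 0, 0)
--     return tuple(_int_metric(usage.get(k, 0)) for k in _KEYS)
--
--
-- def _sum_triples(triples):
--     if not triples:
--         return (0, 0, 0)
--     if len(triples) == 1:
--         return triples[0]
--     m = len(triples) // 2
--     a = _sum_triples(triples[:m])
--     b = _sum_triples(triples[m:])
--     return (a[0] + b[0], a[1] + b[1], a[2] + b[2])
--
--
-- def _aggregate_llm_usage(event):
--     source = event.get("llm_usage", {})
--     if not isinstance(source, dict):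
--         source = {}
--     i, o, t = _sum_triples([_entry_triple(u) for u in source.values()])
--     return {"input_tokens": max(0, i), "output_tokens": max(0, o), "total_tokens": max(0, t)}
-- ===== Notes on version B (the rewrite author's own statement) =====
-- stated objective: alternative
-- what changed: A's single imperative loop mutating a three-key totals dict is replaced by a map/divide-and-conquer decomposition: each usage entry is first normalised to an (input,output,total) triple, the triples are summed componentwise by recursive halving, and the clamped result dict is built once at the end.
import Mathlib
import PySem

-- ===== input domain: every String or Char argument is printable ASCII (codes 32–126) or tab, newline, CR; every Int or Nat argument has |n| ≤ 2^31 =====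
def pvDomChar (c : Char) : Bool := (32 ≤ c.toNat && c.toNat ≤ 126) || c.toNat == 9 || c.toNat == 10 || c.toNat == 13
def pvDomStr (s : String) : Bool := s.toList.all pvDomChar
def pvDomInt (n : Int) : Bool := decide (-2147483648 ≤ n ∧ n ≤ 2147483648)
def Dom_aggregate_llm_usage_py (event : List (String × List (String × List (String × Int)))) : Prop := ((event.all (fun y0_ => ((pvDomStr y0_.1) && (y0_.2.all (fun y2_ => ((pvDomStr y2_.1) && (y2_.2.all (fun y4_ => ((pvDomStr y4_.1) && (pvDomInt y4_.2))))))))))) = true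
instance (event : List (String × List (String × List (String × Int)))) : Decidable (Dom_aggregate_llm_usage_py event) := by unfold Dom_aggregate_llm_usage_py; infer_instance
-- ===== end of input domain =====

-- B replaces A's single loop over a mutable three-key totals dict with a map/divide-and-conquer
-- decomposition (entry → triple, then componentwise sum by recursive halving); return values only.

-- ===== PORT A =====
-- _int_metric: under the typed domain the value is always a Python int (not bool/float),
-- so the first two branches both return int(value) = value and the final 'return 0' is unreachable.
def int_metric_py (value : Int) : Int := value

def aggregate_llm_usage_py (event : List (String × List (String × List (String × Int)))) : List (String × Int) :=
  -- source = event.get("llm_usage", {}); the 'not isinstance(source, dict)' guard is vacuous under the typed domain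
  let source := (PySem.Dict.mk event).getD "llm_usage" []
  let totals : PySem.Dict String Int :=
    PySem.Dict.mk [("input_tokens", 0), ("output_tokens", 0), ("total_tokens", 0)]
  -- for usage in source.values(): (the 'not isinstance(usage, dict)' continue is vacuous under the typed domain)
  let totals := source.foldl (fun t kv =>
    let usage := PySem.Dict.mk kv.2
    let t := t.insert "input_tokens" (t.getD "input_tokens" 0 + int_metric_py (usage.getD "input_tokens" 0))
    let t := t.insert "output_tokens" (t.getD "output_tokens" 0 + int_metric_py (usage.getD "output_tokens" 0))
    t.insert "total_tokens" (t.getD "total_tokens" 0 + int_metric_py (usage.getD "total_tokens" 0))) totals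
  let totals := totals.insert "input_tokens" (max 0 (totals.getD "input_tokens" 0))
  let totals := totals.insert "output_tokens" (max 0 (totals.getD "output_tokens" 0))
  let totals := totals.insert "total_tokens" (max 0 (totals.getD "total_tokens" 0))
  totals.items

-- ===== PORT B =====
def int_metric_alt (value : Int) : Int := value

-- _entry_triple: the 'not isinstance(usage, dict)' branch is vacuous under the typed domain
def entry_triple_alt (u : String × List (String × Int)) : Int × Int × Int :=
  let d := PySem.Dict.mk u.2
  (int_metric_alt (d.getD "input_tokens" 0),
   int_metric_alt (d.getD "output_tokens" 0),
   int_metric_alt (d.getD "total_tokens" 0))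

-- _sum_triples: componentwise sum by recursive halving (divide and conquer)
def sum_triples_alt : List (Int × Int × Int) → Int × Int × Int
  | [] => (0, 0, 0)
  | [a] => a
  | a :: b :: rest =>
    let ts := a :: b :: rest
    let m := ts.length / 2
    let x := sum_triples_alt (ts.take m)
    let y := sum_triples_alt (ts.drop m)
    (x.1 + y.1, x.2.1 + y.2.1, x.2.2 + y.2.2)
termination_by ts => ts.length
decreasing_by
  · simp; omega
  · simp; omega

def aggregate_llm_usage_py_alt (event : List (String × List (String × List (String × Int)))) : List (String × Int) :=
  let source := (PySem.Dict.mk event).getD "llm_usage" []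
  let s := sum_triples_alt (source.map entry_triple_alt)
  [("input_tokens", max 0 s.1), ("output_tokens", max 0 s.2.1), ("total_tokens", max 0 s.2.2)]

-- ===== PRECONDITION & SPEC =====
def Spec_aggregate_llm_usage_py (event : List (String × List (String × List (String × Int)))) (out : List (String × Int)) : Prop := out = aggregate_llm_usage_py_alt event
instance (event : List (String × List (String × List (String × Int)))) (out : List (String × Int)) : Decidable (Spec_aggregate_llm_usage_py event out) := by unfold Spec_aggregate_llm_usage_py; infer_instance

-- ===== CLAIM (what is proved, stated in full; the proofs are below) =====
def Claim_equal_aggregate_llm_usage_py : Prop := ∀ (event : List (String × List (String × List (String × Int)))), Dom_aggregate_llm_usage_py event → Spec_aggregate_llm_usage_py event (aggregate_llm_usage_py event)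

-- ===== LEMMAS AND PROOFS =====

-- componentwise sum in closed form
def tripleSum (ts : List (Int × Int × Int)) : Int × Int × Int :=
  ((ts.map (·.1)).sum, (ts.map (·.2.1)).sum, (ts.map (·.2.2)).sum)

lemma tripleSum_append (xs ys : List (Int × Int × Int)) :
    tripleSum (xs ++ ys) = ((tripleSum xs).1 + (tripleSum ys).1,
                            (tripleSum xs).2.1 + (tripleSum ys).2.1,
                            (tripleSum xs).2.2 + (tripleSum ys).2.2) := by
  simp [tripleSum]

lemma sum_triples_alt_le (n : ℕ) : ∀ ts : List (Int × Int × Int), ts.length ≤ n →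
    sum_triples_alt ts = tripleSum ts := by
  induction n with
  | zero =>
    intro ts h
    have : ts = [] := List.length_eq_zero_iff.mp (Nat.le_zero.mp h)
    subst this; simp [sum_triples_alt, tripleSum]
  | succ n ih =>
    intro ts h
    match ts with
    | [] => simp [sum_triples_alt, tripleSum]
    | [a] => simp [sum_triples_alt, tripleSum]
    | a :: b :: rest =>
      rw [sum_triples_alt]
      have hlen : (a :: b :: rest).length = rest.length + 2 := by simp
      have hm : (a :: b :: rest).length / 2 ≥ 1 ∧ (a :: b :: rest).length / 2 < (a :: b :: rest).length := by omega
      rw [ih _ (by simp_all; omega), ih _ (by simp_all; omega)]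
      conv_rhs => rw [← List.take_append_drop ((a :: b :: rest).length / 2) (a :: b :: rest)]
      rw [tripleSum_append]

lemma sum_triples_alt_eq (ts : List (Int × Int × Int)) : sum_triples_alt ts = tripleSum ts :=
  sum_triples_alt_le ts.length ts le_rfl

-- A's loop body, named for the proofs (definitionally equal to the lambda in the port).
def stepA (t : PySem.Dict String Int) (kv : String × List (String × Int)) : PySem.Dict String Int :=
  let usage := PySem.Dict.mk kv.2
  let t := t.insert "input_tokens" (t.getD "input_tokens" 0 + int_metric_py (usage.getD "input_tokens" 0))
  let t := t.insert "output_tokens" (t.getD "output_tokens" 0 + int_metric_py (usage.getD "output_tokens" 0))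
  t.insert "total_tokens" (t.getD "total_tokens" 0 + int_metric_py (usage.getD "total_tokens" 0))

-- One iteration of A's loop on the three-key totals dict, evaluated.
lemma aggregate_step_eval (kv : String × List (String × Int)) (a b c : Int) :
    stepA (PySem.Dict.mk [("input_tokens", a), ("output_tokens", b), ("total_tokens", c)]) kv
    = PySem.Dict.mk [("input_tokens", a + (PySem.Dict.mk kv.2).getD "input_tokens" 0),
                     ("output_tokens", b + (PySem.Dict.mk kv.2).getD "output_tokens" 0),
                     ("total_tokens", c + (PySem.Dict.mk kv.2).getD "total_tokens" 0)] := by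
  simp [stepA, PySem.Dict.insert, PySem.Dict.getD, PySem.Dict.get?, PySem.Dict.contains, int_metric_py]

-- A's whole loop, from any starting accumulator values, adds per key the per-entry sums.
lemma aggregate_loop_state (src : List (String × List (String × Int))) (a b c : Int) :
    src.foldl stepA (PySem.Dict.mk [("input_tokens", a), ("output_tokens", b), ("total_tokens", c)])
    = PySem.Dict.mk
        [("input_tokens", a + (src.map (fun u => (PySem.Dict.mk u.2).getD "input_tokens" 0)).sum),
         ("output_tokens", b + (src.map (fun u => (PySem.Dict.mk u.2).getD "output_tokens" 0)).sum),
         ("total_tokens", c + (src.map (fun u => (PySem.Dict.mk u.2).getD "total_tokens" 0)).sum)] := by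
  induction src generalizing a b c with
  | nil => simp
  | cons hd tl ih =>
    rw [List.foldl_cons, aggregate_step_eval, ih]
    simp [add_assoc]

-- ===== VERDICT (by name: the statement is the Claim_ definition above) =====
theorem aggregate_llm_usage_py_spec : Claim_equal_aggregate_llm_usage_py := by
  intro event _
  unfold Spec_aggregate_llm_usage_py aggregate_llm_usage_py aggregate_llm_usage_py_alt
  rw [show (fun (t : PySem.Dict String Int) (kv : String × List (String × Int)) =>
      let usage := PySem.Dict.mk kv.2
      let t := t.insert "input_tokens" (t.getD "input_tokens" 0 + int_metric_py (usage.getD "input_tokens" 0))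
      let t := t.insert "output_tokens" (t.getD "output_tokens" 0 + int_metric_py (usage.getD "output_tokens" 0))
      t.insert "total_tokens" (t.getD "total_tokens" 0 + int_metric_py (usage.getD "total_tokens" 0))) = stepA
    from rfl]
  simp only [aggregate_loop_state, sum_triples_alt_eq]
  simp [PySem.Dict.insert, PySem.Dict.getD, PySem.Dict.get?, PySem.Dict.contains,
        tripleSum, entry_triple_alt, int_metric_alt, Function.comp_def]
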